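-- pv_equiv track=rewrite | github.com/chrisarseno/nexus-system | attached_assets/local_ai_models_1756928849343.py | _infer_model_capabilities
-- ===== SOURCE A (Python) =====
-- from typing import Dict, List, Any, Optional, Union
--
-- def _infer_model_capabilities(model_name: str) -> List[str]:
--     """Infer model capabilities from model name."""
--     capabilities = ['text_generation']
--
--     name_lower = model_name.lower()
--
--     if 'code' in name_lower or 'codellama' in name_lower:
--         capabilities.extend(['code_generation', 'analysis'])
--
--     if 'instruct' in name_lower or 'chat' in name_lower:
--         capabilities.extend(['reasoning', 'analysis'])
--
--     if 'llama' in name_lower or 'alpaca' in name_lower: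
--         capabilities.extend(['reasoning', 'creative_writing', 'analysis'])
--
--     if 'bert' in name_lower:
--         capabilities.extend(['analysis'])
--
--     if any(word in name_lower for word in ['gpt', 'dialogue', 'chat']):
--         capabilities.extend(['creative_writing', 'reasoning'])
--
--     return capabilities
-- ===== SOURCE B (Python) =====
-- # Two-phase bitmask approach: flatten the rule groups into a keyword->bitmask
-- # table (one pass over keywords builds a 5-bit mask of fired rules, with 'chat'
-- # setting two bits at once), then decode the mask into the capability list.
-- _KEYWORD_BITS = {
--     'code': 1, 'codellama': 1,
--     'instruct': 2, 'chat': 2 | 16,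
--     'llama': 4, 'alpaca': 4,
--     'bert': 8,
--     'gpt': 16, 'dialogue': 16,
-- }
--
-- _BIT_TAGS = [
--     ['code_generation', 'analysis'],
--     ['reasoning', 'analysis'],
--     ['reasoning', 'creative_writing', 'analysis'],
--     ['analysis'],
--     ['creative_writing', 'reasoning'],
-- ]
--
-- def _infer_model_capabilities(model_name: str):
--     name = model_name.lower()
--     mask = 0
--     for kw, bits in _KEYWORD_BITS.items():
--         if kw in name:
--             mask |= bits
--     caps = ['text_generation']
--     for i, tags in enumerate(_BIT_TAGS):
--         if (mask >> i) & 1: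
--             caps.extend(tags)
--     return caps
-- ===== Notes on version B (the rewrite author's own statement) =====
-- stated objective: alternative
-- what changed: Replaces A's sequence of if-blocks with two phases: a flat keyword->bitmask table is scanned once to accumulate a 5-bit mask of fired rule groups (with 'chat' setting two bits), and the mask is then decoded bit by bit into the capability list.
import Mathlib
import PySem

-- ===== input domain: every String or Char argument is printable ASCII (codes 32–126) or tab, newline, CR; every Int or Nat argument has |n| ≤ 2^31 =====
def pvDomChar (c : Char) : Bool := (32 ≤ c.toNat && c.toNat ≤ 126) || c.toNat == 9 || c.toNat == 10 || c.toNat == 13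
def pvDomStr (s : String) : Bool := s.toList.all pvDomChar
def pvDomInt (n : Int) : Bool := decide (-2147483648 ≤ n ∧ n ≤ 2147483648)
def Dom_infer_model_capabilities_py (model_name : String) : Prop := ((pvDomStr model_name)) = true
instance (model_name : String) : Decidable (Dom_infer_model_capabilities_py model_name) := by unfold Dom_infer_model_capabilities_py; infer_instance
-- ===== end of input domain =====

-- B replaces A's if-block chain by two phases: a keyword->bitmask scan accumulating a 5-bit
-- mask of fired rule groups, then a bit-by-bit decode of the mask into the tag list (alternative).

-- ===== PORT A =====
def infer_model_capabilities_py (model_name : String) : List String :=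
  let capabilities : List String := ["text_generation"]
  let name_lower := PySem.Str.lower model_name
  let capabilities :=
    if PySem.Str.isIn "code" name_lower || PySem.Str.isIn "codellama" name_lower then
      capabilities ++ ["code_generation", "analysis"] else capabilities
  let capabilities :=
    if PySem.Str.isIn "instruct" name_lower || PySem.Str.isIn "chat" name_lower then
      capabilities ++ ["reasoning", "analysis"] else capabilities
  let capabilities :=
    if PySem.Str.isIn "llama" name_lower || PySem.Str.isIn "alpaca" name_lower then
      capabilities ++ ["reasoning", "creative_writing", "analysis"] else capabilities
  let capabilities :=
    if PySem.Str.isIn "bert" name_lower then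
      capabilities ++ ["analysis"] else capabilities
  let capabilities :=
    if (["gpt", "dialogue", "chat"] : List String).any (fun word => PySem.Str.isIn word name_lower) then
      capabilities ++ ["creative_writing", "reasoning"] else capabilities
  capabilities

-- ===== PORT B =====
-- dict keyword -> bitmask (insertion order); 'chat' carries the bits of rule groups 1 and 4
def pvKeywordBits : List (String × Nat) :=
  [("code", 1), ("codellama", 1),
   ("instruct", 2), ("chat", 2 ||| 16),
   ("llama", 4), ("alpaca", 4),
   ("bert", 8),
   ("gpt", 16), ("dialogue", 16)]

def pvBitTags : List (List String) :=
  [["code_generation", "analysis"],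
   ["reasoning", "analysis"],
   ["reasoning", "creative_writing", "analysis"],
   ["analysis"],
   ["creative_writing", "reasoning"]]

def infer_model_capabilities_py_alt (model_name : String) : List String :=
  let name := PySem.Str.lower model_name
  let mask : Nat := pvKeywordBits.foldl
    (fun m kb => if PySem.Str.isIn kb.1 name then m ||| kb.2 else m) 0
  (PySem.List.enumerate pvBitTags).foldl
    (fun caps it => if (mask >>> it.1.toNat) &&& 1 = 1 then caps ++ it.2 else caps)
    ["text_generation"]

-- ===== PRECONDITION & SPEC =====
def Spec_infer_model_capabilities_py (model_name : String) (out : List String) : Prop := out = infer_model_capabilities_py_alt model_name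
instance (model_name : String) (out : List String) : Decidable (Spec_infer_model_capabilities_py model_name out) := by unfold Spec_infer_model_capabilities_py; infer_instance

-- ===== CLAIM =====
def Claim_equal_infer_model_capabilities_py : Prop := ∀ (model_name : String), Dom_infer_model_capabilities_py model_name → Spec_infer_model_capabilities_py model_name (infer_model_capabilities_py model_name)

-- ===== LEMMAS AND PROOFS =====
-- (the verdict abstracts the nine substring tests to Bool variables and decides the 512 cases)

-- ===== VERDICT =====
theorem infer_model_capabilities_py_spec : Claim_equal_infer_model_capabilities_py := by
  intro model_name _
  unfold Spec_infer_model_capabilities_py infer_model_capabilities_py infer_model_capabilities_py_alt pvKeywordBits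
  simp only [List.foldl_cons, List.foldl_nil, List.any_cons, List.any_nil, Bool.or_false]
  generalize PySem.Str.lower model_name = nl
  generalize PySem.Str.isIn "code" nl = b1
  generalize PySem.Str.isIn "codellama" nl = b2
  generalize PySem.Str.isIn "instruct" nl = b3
  generalize PySem.Str.isIn "chat" nl = b4
  generalize PySem.Str.isIn "llama" nl = b5
  generalize PySem.Str.isIn "alpaca" nl = b6
  generalize PySem.Str.isIn "bert" nl = b7
  generalize PySem.Str.isIn "gpt" nl = b8
  generalize PySem.Str.isIn "dialogue" nl = b9
  revert b1 b2 b3 b4 b5 b6 b7 b8 b9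
  decide
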